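-- pv_equiv track=rewrite | github.com/paiml/depyler | examples/hard_clustering_1d.py | assign_clusters
-- ===== SOURCE A (Python) =====
-- def abs_val(x: int) -> int:
--     if x < 0:
--         return -x
--     return x
--
-- def assign_clusters(data: list[int], centroids: list[int]) -> list[int]:
--     # Assign each data point to nearest centroid
--     assignments: list[int] = []
--     i: int = 0
--     while i < len(data):
--         best_cluster: int = 0
--         best_dist: int = abs_val(data[i] - centroids[0])
--         j: int = 1
--         while j < len(centroids):
--             dist: int = abs_val(data[i] - centroids[j])
--             if dist < best_dist:
--                 best_dist = dist
--                 best_cluster = j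
--             j = j + 1
--         assignments.append(best_cluster)
--         i = i + 1
--     return assignments
-- ===== SOURCE B (Python) =====
-- def assign_clusters(data: list[int], centroids: list[int]) -> list[int]:
--     # Sort the distinct centroid values once; per point, binary-search the
--     # insertion position and compare only the two neighbouring values,
--     # breaking distance ties by the smaller original centroid index.
--     first_idx: dict[int, int] = {}
--     for i, c in enumerate(centroids):
--         if c not in first_idx:
--             first_idx[c] = i
--     vals = sorted(first_idx)
--     out: list[int] = []
--     for x in data:
--         lo, hi = 0, len(vals)
--         while lo < hi:
--             mid = (lo + hi) // 2
--             if vals[mid] < x: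
--                 lo = mid + 1
--             else:
--                 hi = mid
--         if lo == 0:
--             out.append(first_idx[vals[0]])
--         elif lo == len(vals):
--             out.append(first_idx[vals[len(vals) - 1]])
--         else:
--             left = vals[lo - 1]
--             right = vals[lo]
--             dl = x - left
--             dh = right - x
--             if dl < dh:
--                 out.append(first_idx[left])
--             elif dh < dl:
--                 out.append(first_idx[right])
--             else:
--                 out.append(min(first_idx[left], first_idx[right]))
--     return out
-- ===== Notes on version B (the rewrite author's own statement) =====
-- stated objective: faster
-- what changed: B sorts the distinct centroid values once (with a first-occurrence index map) and binary-searches each data point's insertion position, comparing only the two neighbouring values and breaking distance ties by the smaller original centroid index, instead of A's linear scan over all centroids per point.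
import Mathlib
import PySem

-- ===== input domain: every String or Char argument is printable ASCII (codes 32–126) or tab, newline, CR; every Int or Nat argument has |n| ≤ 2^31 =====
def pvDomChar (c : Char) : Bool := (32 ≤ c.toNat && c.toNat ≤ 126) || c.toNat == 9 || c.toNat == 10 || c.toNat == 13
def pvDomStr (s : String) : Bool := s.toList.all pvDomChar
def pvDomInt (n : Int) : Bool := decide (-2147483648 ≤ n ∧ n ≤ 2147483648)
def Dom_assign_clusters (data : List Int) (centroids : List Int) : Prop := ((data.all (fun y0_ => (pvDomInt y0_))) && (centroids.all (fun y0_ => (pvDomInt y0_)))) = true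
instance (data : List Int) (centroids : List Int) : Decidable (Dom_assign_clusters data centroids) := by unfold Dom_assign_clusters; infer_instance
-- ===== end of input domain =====

-- B replaces A's per-point linear scan over all centroids by one sort of the
-- distinct centroid values plus a per-point binary search (tie broken by the
-- smaller original index); equivalence is proved for nonempty centroids.

-- ===== PORT A =====
def abs_val (x : Int) : Int := if x < 0 then -x else x

-- inner 'while j < len(centroids)' loop of A; fuel = centroids.length makes the
-- recursion structural and is never exhausted while j < len(centroids)
def pvInnerA (x : Int) (centroids : List Int) (fuel j : Nat) (bestCluster bestDist : Int) : Int × Int :=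
  match fuel with
  | 0 => (bestCluster, bestDist)
  | f + 1 =>
    if h : j < centroids.length then
      let dist := abs_val (x - centroids[j])
      if dist < bestDist then pvInnerA x centroids f (j + 1) (Int.ofNat j) dist
      else pvInnerA x centroids f (j + 1) bestCluster bestDist
    else (bestCluster, bestDist)

-- outer 'while i < len(data)' loop of A, appending one assignment per point;
-- 'centroids.headD 0' is Python's centroids[0]: the empty-centroids case raises
-- IndexError in Python and is excluded by Pre_.
def pvOuterA (centroids : List Int) (xs : List Int) : List Int :=
  match xs with
  | [] => []
  | x :: rest =>
      (pvInnerA x centroids centroids.length 1 0 (abs_val (x - centroids.headD 0))).1 ::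
        pvOuterA centroids rest

def assign_clusters (data : List Int) (centroids : List Int) : List Int :=
  pvOuterA centroids data

-- ===== PORT B =====
-- 'for i, c in enumerate(centroids): if c not in first_idx: first_idx[c] = i'
def pvBuildIdx (centroids : List Int) : PySem.Dict Int Int :=
  (PySem.List.enumerate centroids 0).foldl
    (fun d p => if d.contains p.2 then d else d.insert p.2 p.1) PySem.Dict.empty

-- hand-written bisect_left loop of B; vals.getD mid 0 is Python's vals[mid]
-- (mid is always in range when hi ≤ len(vals), as in B's only call); fuel =
-- len(vals) makes the recursion structural and is never exhausted (each step
-- shrinks hi - lo, which starts at most at len(vals))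
def pvBisect (vals : List Int) (x : Int) (fuel lo hi : Nat) : Nat :=
  match fuel with
  | 0 => lo
  | f + 1 =>
    if lo < hi then
      if vals.getD ((lo + hi) / 2) 0 < x then pvBisect vals x f ((lo + hi) / 2 + 1) hi
      else pvBisect vals x f lo ((lo + hi) / 2)
    else lo

-- per-point branch logic of B; dictionary and list accesses use getD with a
-- junk default exactly where Python's lookups always succeed (vals nonempty,
-- both neighbours present as keys); the empty-vals case raises in Python and
-- is excluded by Pre_.
def pvPickB (fi : PySem.Dict Int Int) (vals : List Int) (x : Int) : Int :=
  let lo := pvBisect vals x vals.length 0 vals.length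
  if lo = 0 then fi.getD (vals.getD 0 0) 0
  else if lo = vals.length then fi.getD (vals.getD (vals.length - 1) 0) 0
  else
    let left := vals.getD (lo - 1) 0
    let right := vals.getD lo 0
    let dl := x - left
    let dh := right - x
    if dl < dh then fi.getD left 0
    else if dh < dl then fi.getD right 0
    else min (fi.getD left 0) (fi.getD right 0)

-- 'for x in data: out.append(...)'
def pvOuterB (fi : PySem.Dict Int Int) (vals : List Int) (xs : List Int) : List Int :=
  match xs with
  | [] => []
  | x :: rest => pvPickB fi vals x :: pvOuterB fi vals rest

def assign_clusters_alt (data : List Int) (centroids : List Int) : List Int :=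
  let fi := pvBuildIdx centroids
  let vals := PySem.List.sorted fi.keys (fun v => v) false
  pvOuterB fi vals data

-- ===== PRECONDITION & SPEC =====
-- Pre_ excludes empty centroids with nonempty data: there Python's A raises
-- IndexError on centroids[0] (and B raises IndexError on vals[0] as well).
def Pre_assign_clusters (data : List Int) (centroids : List Int) : Prop :=
  centroids ≠ [] ∨ data = []
instance (data : List Int) (centroids : List Int) : Decidable (Pre_assign_clusters data centroids) := by
  unfold Pre_assign_clusters; infer_instance

def pvWitness_assign_clusters : List Int × List Int := ([2, -5, 7], [1, 4])

def Spec_assign_clusters (data : List Int) (centroids : List Int) (out : List Int) : Prop := out = assign_clusters_alt data centroids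
instance (data : List Int) (centroids : List Int) (out : List Int) : Decidable (Spec_assign_clusters data centroids out) := by unfold Spec_assign_clusters; infer_instance

-- ===== CLAIM (what is proved, stated in full; the proofs are below) =====
def Claim_equal_assign_clusters : Prop := ∀ (data : List Int) (centroids : List Int), Dom_assign_clusters data centroids → Pre_assign_clusters data centroids → Spec_assign_clusters data centroids (assign_clusters data centroids)

-- ===== LEMMAS AND PROOFS =====

-- ---- abbreviations used only by the proofs ----

-- distance of point x to centroid c, as A computes it
def pdist (x c : Int) : Int := abs_val (x - c)

-- running minimum of distances, as maintained by A's inner loop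
def foldMin (x : Int) (l : List Int) (b : Int) : Int :=
  l.foldl (fun a c => min a (pdist x c)) b

-- A's inner loop, re-expressed structurally on the remaining centroid list
def pvInnerList (x : Int) (l : List Int) (j : Nat) (bc bd : Int) : Int × Int :=
  match l with
  | [] => (bc, bd)
  | c :: t =>
      if pdist x c < bd then pvInnerList x t (j + 1) (Int.ofNat j) (pdist x c)
      else pvInnerList x t (j + 1) bc bd

-- index of the first centroid at globally minimal distance (the common spec)
def nearest (x : Int) (c0 : Int) (rest : List Int) : Int :=
  Int.ofNat ((c0 :: rest).findIdx (fun c => pdist x c = foldMin x rest (pdist x c0)))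

theorem foldMin_le_init (x : Int) (l : List Int) (b : Int) : foldMin x l b ≤ b := by
  induction l generalizing b with
  | nil => simp [foldMin]
  | cons c t ih =>
      calc foldMin x (c :: t) b = foldMin x t (min b (pdist x c)) := rfl
        _ ≤ min b (pdist x c) := ih _
        _ ≤ b := min_le_left _ _

theorem foldMin_le_mem (x c : Int) :
    ∀ (l : List Int) (b : Int), c ∈ l → foldMin x l b ≤ pdist x c := by
  intro l
  induction l with
  | nil => intro b hc; simp at hc
  | cons a t ih =>
      intro b hc
      rcases List.mem_cons.mp hc with h | h
      · subst h
        calc foldMin x (c :: t) b = foldMin x t (min b (pdist x c)) := rfl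
          _ ≤ min b (pdist x c) := foldMin_le_init _ _ _
          _ ≤ pdist x c := min_le_right _ _
      · exact ih _ h

theorem foldMin_cases (x : Int) (l : List Int) (b : Int) :
    foldMin x l b = b ∨ ∃ c ∈ l, foldMin x l b = pdist x c := by
  induction l generalizing b with
  | nil => left; simp [foldMin]
  | cons a t ih =>
      have h : foldMin x (a :: t) b = foldMin x t (min b (pdist x a)) := rfl
      rcases ih (min b (pdist x a)) with h0 | ⟨c, hc, hcd⟩
      · rcases le_total b (pdist x a) with hle | hle
        · left; rw [h, h0]; omega
        · right; exact ⟨a, List.mem_cons_self, by rw [h, h0]; omega⟩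
      · right; exact ⟨c, List.mem_cons_of_mem _ hc, by rw [h, hcd]⟩

-- uniqueness of the minimum value
theorem foldMin_eq_of (x : Int) (c0 : Int) (rest : List Int) (D : Int)
    (hlow : ∀ c ∈ c0 :: rest, D ≤ pdist x c)
    (hmem : ∃ c ∈ c0 :: rest, pdist x c = D) :
    foldMin x rest (pdist x c0) = D := by
  obtain ⟨w, hw, hwd⟩ := hmem
  have h1 : foldMin x rest (pdist x c0) ≤ D := by
    rcases List.mem_cons.mp hw with h | h
    · subst h; rw [← hwd]; exact foldMin_le_init _ _ _
    · rw [← hwd]; exact foldMin_le_mem x w rest (pdist x c0) h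
  have h2 : D ≤ foldMin x rest (pdist x c0) := by
    rcases foldMin_cases x rest (pdist x c0) with h | ⟨c, hc, hcd⟩
    · rw [h]; exact hlow c0 List.mem_cons_self
    · rw [hcd]; exact hlow c (List.mem_cons_of_mem _ hc)
  omega

-- ---- A characterization ----

theorem pvInnerA_eq_list (x : Int) (cs : List Int) :
    ∀ (fuel j : Nat), cs.length ≤ fuel + j → ∀ bc bd,
      pvInnerA x cs fuel j bc bd = pvInnerList x (cs.drop j) j bc bd := by
  intro fuel
  induction fuel with
  | zero =>
    intro j hj bc bd
    rw [List.drop_eq_nil_of_le (by omega)]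
    rfl
  | succ f ih =>
    intro j hj bc bd
    by_cases h : j < cs.length
    · have hdrop : cs.drop j = cs[j] :: cs.drop (j + 1) := (List.getElem_cons_drop h).symm
      rw [pvInnerA, dif_pos h, hdrop]
      simp only [pvInnerList, pdist]
      split
      · exact ih (j + 1) (by omega) _ _
      · exact ih (j + 1) (by omega) _ _
    · rw [pvInnerA, dif_neg h, List.drop_eq_nil_of_le (by omega)]
      rfl

theorem pvInnerList_fst (x : Int) :
    ∀ (l : List Int) (j : Nat) (bc bd : Int),
    (pvInnerList x l j bc bd).1 =
      if foldMin x l bd = bd then bc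
      else Int.ofNat (j + l.findIdx (fun c => pdist x c = foldMin x l bd)) := by
  intro l
  induction l with
  | nil => intro j bc bd; simp [pvInnerList, foldMin]
  | cons c t ih =>
    intro j bc bd
    have hfold : foldMin x (c :: t) bd = foldMin x t (min bd (pdist x c)) := rfl
    by_cases hlt : pdist x c < bd
    · have hmin : min bd (pdist x c) = pdist x c := by omega
      have hm : foldMin x (c :: t) bd = foldMin x t (pdist x c) := by rw [hfold, hmin]
      have hle : foldMin x (c :: t) bd ≤ pdist x c := by
        rw [hm]; exact foldMin_le_init _ _ _
      rw [pvInnerList, if_pos hlt, ih]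
      by_cases he : foldMin x t (pdist x c) = pdist x c
      · -- head achieves the minimum
        rw [if_pos he, if_neg (by rw [hm, he]; omega)]
        rw [List.findIdx_cons]
        have : (fun c' => decide (pdist x c' = foldMin x (c :: t) bd)) c = true := by
          simp [hm, he]
        simp only [hm, he] at *
        simp
      · rw [if_neg he, if_neg (by rw [hm]; omega)]
        have hne : pdist x c ≠ foldMin x (c :: t) bd := by
          rw [hm]; intro hcontra
          exact he hcontra.symm
        rw [List.findIdx_cons]
        simp only [hm]
        have hfalse : decide (pdist x c = foldMin x t (pdist x c)) = false := by
          simp; intro hcontra; exact he hcontra.symm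
        rw [hfalse]
        simp only [cond_false]
        congr 1
        omega
    · have hmin : min bd (pdist x c) = bd := by omega
      have hm : foldMin x (c :: t) bd = foldMin x t bd := by rw [hfold, hmin]
      rw [pvInnerList, if_neg hlt, ih]
      by_cases he : foldMin x t bd = bd
      · rw [if_pos he, if_pos (by rw [hm, he])]
      · rw [if_neg he, if_neg (by rw [hm]; exact he)]
        have hlt2 : foldMin x t bd < bd :=
          lt_of_le_of_ne (foldMin_le_init _ _ _) he
        have hfalse : decide (pdist x c = foldMin x (c :: t) bd) = false := by
          simp [hm]; omega
        rw [List.findIdx_cons, hfalse]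
        simp only [cond_false, hm]
        congr 1
        omega

-- A's per-point value equals 'nearest'
theorem pointA_eq_nearest (x c0 : Int) (rest : List Int) :
    (pvInnerA x (c0 :: rest) (c0 :: rest).length 1 0 (abs_val (x - c0))).1 =
      nearest x c0 rest := by
  have h0 : abs_val (x - c0) = pdist x c0 := rfl
  rw [h0, pvInnerA_eq_list x (c0 :: rest) (c0 :: rest).length 1 (by omega),
    List.drop_one, List.tail_cons, pvInnerList_fst, nearest]
  by_cases he : foldMin x rest (pdist x c0) = pdist x c0
  · rw [if_pos he, List.findIdx_cons]
    have : decide (pdist x c0 = foldMin x rest (pdist x c0)) = true := by simp [he]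
    rw [this]; rfl
  · rw [if_neg he, List.findIdx_cons]
    have : decide (pdist x c0 = foldMin x rest (pdist x c0)) = false := by
      simp; intro h; exact he h.symm
    rw [this]
    simp only [cond_false]
    congr 1
    omega

-- ---- B: the first-index dictionary ----

theorem buildIdx_fold_get (v : Int) :
    ∀ (cs : List Int) (n : Int) (d : PySem.Dict Int Int),
    ((PySem.List.enumerate cs n).foldl
        (fun d p => if d.contains p.2 then d else d.insert p.2 p.1) d).get? v =
      match d.get? v with
      | some w => some w
      | none => if v ∈ cs then some (n + (cs.findIdx (· == v) : Int)) else none := by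
  intro cs
  induction cs with
  | nil =>
    intro n d
    cases h : d.get? v <;> simp [PySem.List.enumerate, h]
  | cons c t ih =>
    intro n d
    rw [PySem.List.enumerate_cons]
    simp only [List.foldl_cons]
    rw [ih]
    cases hd : d.get? v with
    | some w =>
      have : (if d.contains c then d else d.insert c n).get? v = some w := by
        split
        · exact hd
        · rename_i hnc
          rw [PySem.Dict.get?_insert]
          split
          · rename_i hvc
            subst hvc
            rw [PySem.Dict.contains_eq_isSome_get?, hd] at hnc
            simp at hnc
          · exact hd
      rw [this]
    | none =>
      by_cases hvc : v = c
      · subst hvc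
        have hnc : d.contains v = false := by
          rw [PySem.Dict.contains_eq_isSome_get?, hd]; rfl
        rw [hnc]
        simp only [Bool.false_eq_true, if_false]
        have : (d.insert v n).get? v = some n := by
          rw [PySem.Dict.get?_insert]; simp
        rw [this]
        simp [List.findIdx_cons]
      · have : (if d.contains c then d else d.insert c n).get? v = none := by
          split
          · exact hd
          · rw [PySem.Dict.get?_insert, if_neg hvc]; exact hd
        rw [this]
        have hmem : (v ∈ c :: t) = (v ∈ t) := by
          simp [List.mem_cons, hvc]
        by_cases hvt : v ∈ t
        · rw [if_pos hvt, if_pos (by simp [List.mem_cons, hvt])]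
          have hidx : (c :: t).findIdx (· == v) = t.findIdx (· == v) + 1 := by
            rw [List.findIdx_cons]
            have : (c == v) = false := by simp; omega
            rw [this]; rfl
          rw [hidx]
          push_cast
          ring_nf
        · rw [if_neg hvt, if_neg (by simp [List.mem_cons, hvc, hvt])]

theorem buildIdx_get (cs : List Int) (v : Int) :
    (pvBuildIdx cs).get? v =
      if v ∈ cs then some ((cs.findIdx (· == v) : Int)) else none := by
  rw [pvBuildIdx, buildIdx_fold_get v cs 0 PySem.Dict.empty, PySem.Dict.get?_empty]
  by_cases h : v ∈ cs
  · simp [h]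
  · simp [h]

theorem buildIdx_mem_keys (cs : List Int) (v : Int) :
    v ∈ (pvBuildIdx cs).keys ↔ v ∈ cs := by
  rw [← not_iff_not, ← PySem.Dict.get?_eq_none_iff_not_mem_keys, buildIdx_get]
  split <;> simp_all

theorem buildIdx_getD (cs : List Int) (v : Int) (hv : v ∈ cs) :
    (pvBuildIdx cs).getD v 0 = (cs.findIdx (· == v) : Int) := by
  rw [PySem.Dict.getD_eq_get?_getD, buildIdx_get, if_pos hv]
  rfl

-- ---- B: binary search ----

theorem pvBisect_spec (vals : List Int) (x : Int)
    (hs : vals.Pairwise (· ≤ ·)) :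
    ∀ fuel lo hi, hi - lo ≤ fuel → lo ≤ hi → hi ≤ vals.length →
    (∀ i (_ : i < vals.length), i < lo → vals[i] < x) →
    (∀ i (_ : i < vals.length), hi ≤ i → x ≤ vals[i]) →
    pvBisect vals x fuel lo hi ≤ vals.length ∧
    (∀ i (_ : i < vals.length), i < pvBisect vals x fuel lo hi → vals[i] < x) ∧
    (∀ i (_ : i < vals.length), pvBisect vals x fuel lo hi ≤ i → x ≤ vals[i]) := by
  have hmono : ∀ i j (_ : i < vals.length) (_ : j < vals.length), i ≤ j → vals[i] ≤ vals[j] := by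
    intro i j hi hj hij
    rcases Nat.eq_or_lt_of_le hij with h | h
    · subst h; exact le_refl _
    · exact List.pairwise_iff_getElem.mp hs i j hi hj h
  intro fuel
  induction fuel with
  | zero =>
    intro lo hi hfuel hlohi hhile hlow hhigh
    have hr : pvBisect vals x 0 lo hi = lo := rfl
    rw [hr]
    exact ⟨by omega, fun i h1 h2 => hlow i h1 h2, fun i h1 h2 => hhigh i h1 (by omega)⟩
  | succ f ih =>
    intro lo hi hfuel hlohi hhile hlow hhigh
    rw [pvBisect]
    by_cases h : lo < hi
    · rw [if_pos h]
      have hmlo : lo ≤ (lo + hi) / 2 := by omega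
      have hmhi : (lo + hi) / 2 < hi := by omega
      have hmlen : (lo + hi) / 2 < vals.length := by omega
      rw [List.getD_eq_getElem vals 0 hmlen]
      by_cases hc : vals[(lo + hi) / 2] < x
      · rw [if_pos hc]
        refine ih ((lo + hi) / 2 + 1) hi (by omega) (by omega) hhile ?_ hhigh
        intro i h1 h2
        rcases Nat.lt_or_ge i lo with h3 | h3
        · exact hlow i h1 h3
        · exact lt_of_le_of_lt (hmono i ((lo + hi) / 2) h1 hmlen (by omega)) hc
      · rw [if_neg hc]
        refine ih lo ((lo + hi) / 2) (by omega) (by omega) (by omega) hlow ?_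
        intro i h1 h2
        exact le_trans (not_lt.mp hc) (hmono ((lo + hi) / 2) i hmlen h1 h2)
    · rw [if_neg h]
      exact ⟨by omega, fun i h1 h2 => hlow i h1 h2, fun i h1 h2 => hhigh i h1 (by omega)⟩

-- ---- findIdx helpers ----

theorem findIdx_congr_mem {α : Type} (l : List α) (p q : α → Bool)
    (h : ∀ a ∈ l, p a = q a) : l.findIdx p = l.findIdx q := by
  induction l with
  | nil => rfl
  | cons a t ih =>
    rw [List.findIdx_cons, List.findIdx_cons, h a List.mem_cons_self,
      ih (fun b hb => h b (List.mem_cons_of_mem _ hb))]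

theorem findIdx_or_min {α : Type} (l : List α) (p q : α → Bool) :
    l.findIdx (fun a => p a || q a) = min (l.findIdx p) (l.findIdx q) := by
  induction l with
  | nil => rfl
  | cons a t ih =>
    rw [List.findIdx_cons, List.findIdx_cons, List.findIdx_cons]
    cases hp : p a <;> cases hq : q a <;>
      simp only [Bool.or_true, Bool.or_false, cond_true, cond_false, ih] <;> omega

-- ---- the per-point equivalence ----

theorem pickB_eq_nearest (c0 : Int) (rest : List Int) (x : Int) :
    pvPickB (pvBuildIdx (c0 :: rest))
      (PySem.List.sorted (pvBuildIdx (c0 :: rest)).keys (fun v => v) false) x =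
    nearest x c0 rest := by
  have hmemv : ∀ v : Int, v ∈ PySem.List.sorted (pvBuildIdx (c0 :: rest)).keys (fun v => v) false ↔ v ∈ c0 :: rest := by
    intro v
    rw [PySem.List.mem_sorted]
    exact buildIdx_mem_keys (c0 :: rest) v
  set cs : List Int := c0 :: rest with hcs
  set fi : PySem.Dict Int Int := pvBuildIdx cs with hfi
  set vals : List Int := PySem.List.sorted fi.keys (fun v => v) false with hvals
  have hle : vals.Pairwise (· ≤ ·) := PySem.List.sorted_pairwise fi.keys (fun v => v)
  have hmono : ∀ i j (_ : i < vals.length) (_ : j < vals.length), i ≤ j → vals[i] ≤ vals[j] := by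
    intro i j hi hj hij
    rcases Nat.eq_or_lt_of_le hij with h | h
    · subst h; exact le_refl _
    · exact List.pairwise_iff_getElem.mp hle i j hi hj h
  have hlen : 0 < vals.length := by
    have : c0 ∈ vals := (hmemv c0).mpr List.mem_cons_self
    exact List.length_pos_of_mem this
  obtain ⟨hr1, hr2, hr3⟩ := pvBisect_spec vals x hle vals.length 0 vals.length (by omega)
    (by omega) le_rfl (fun i h1 h2 => by omega) (fun i h1 h2 => by omega)
  -- each member of cs is some vals[i]
  have hrep : ∀ c ∈ cs, ∃ (i : Nat) (h : i < vals.length), vals[i] = c := by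
    intro c hc
    exact List.mem_iff_getElem.mp ((hmemv c).mpr hc)
  set M : Int := foldMin x rest (pdist x c0) with hM
  -- once the minimal distance is characterized, each output branch follows
  have finish : ∀ (p : Int → Bool),
      (∀ c ∈ cs, (decide (pdist x c = M)) = p c) →
      nearest x c0 rest = Int.ofNat (cs.findIdx p) := by
    intro p hp
    rw [nearest, ← hM, ← hcs]
    exact congrArg Int.ofNat (findIdx_congr_mem cs _ p hp)
  simp only [pvPickB]
  set r : Nat := pvBisect vals x vals.length 0 vals.length with hr
  by_cases hr0 : r = 0
  · -- every centroid is ≥ x; the nearest is the smallest value vals[0]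
    rw [if_pos hr0]
    have hxle : ∀ c ∈ cs, x ≤ c := by
      intro c hc
      obtain ⟨i, hi, hic⟩ := hrep c hc
      rw [← hic]
      exact hr3 i hi (by omega)
    have h0cs : vals[0] ∈ cs := (hmemv _).mp (List.getElem_mem hlen)
    have h0le : ∀ c ∈ cs, vals[0] ≤ c := by
      intro c hc
      obtain ⟨i, hi, hic⟩ := hrep c hc
      rw [← hic]
      exact hmono 0 i hlen hi (by omega)
    have hpd : ∀ c ∈ cs, pdist x c = c - x := by
      intro c hc
      have := hxle c hc
      simp only [pdist, abs_val]; split <;> omega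
    have hMv : M = vals[0] - x := by
      rw [hM]
      refine foldMin_eq_of x c0 rest _ ?_ ⟨vals[0], h0cs, ?_⟩
      · intro c hc
        rw [hpd c hc]
        have := h0le c hc
        omega
      · rw [hpd _ h0cs]
    have hout : nearest x c0 rest = Int.ofNat (cs.findIdx (· == vals[0])) := by
      refine finish _ ?_
      intro c hc
      rw [Bool.eq_iff_iff]
      simp only [decide_eq_true_eq, beq_iff_eq]
      rw [hpd c hc, hMv]
      constructor
      · intro h; omega
      · intro h; omega
    rw [hout, List.getD_eq_getElem vals 0 hlen, buildIdx_getD cs vals[0] h0cs]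
    rfl
  · by_cases hrlen : r = vals.length
    · -- every centroid is < x; the nearest is the largest value
      rw [if_neg hr0, if_pos hrlen]
      have hlast : vals.length - 1 < vals.length := by omega
      have hclt : ∀ c ∈ cs, c < x := by
        intro c hc
        obtain ⟨i, hi, hic⟩ := hrep c hc
        rw [← hic]
        exact hr2 i hi (by omega)
      have hlcs : vals[vals.length - 1] ∈ cs := (hmemv _).mp (List.getElem_mem hlast)
      have hlge : ∀ c ∈ cs, c ≤ vals[vals.length - 1] := by
        intro c hc
        obtain ⟨i, hi, hic⟩ := hrep c hc
        rw [← hic]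
        exact hmono i (vals.length - 1) hi hlast (by omega)
      have hpd : ∀ c ∈ cs, pdist x c = x - c := by
        intro c hc
        have := hclt c hc
        simp only [pdist, abs_val]; split <;> omega
      have hMv : M = x - vals[vals.length - 1] := by
        rw [hM]
        refine foldMin_eq_of x c0 rest _ ?_ ⟨vals[vals.length - 1], hlcs, ?_⟩
        · intro c hc
          rw [hpd c hc]
          have := hlge c hc
          omega
        · rw [hpd _ hlcs]
      have hout : nearest x c0 rest = Int.ofNat (cs.findIdx (· == vals[vals.length - 1])) := by
        refine finish _ ?_
        intro c hc
        rw [Bool.eq_iff_iff]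
        simp only [decide_eq_true_eq, beq_iff_eq]
        rw [hpd c hc, hMv]
        constructor
        · intro h; omega
        · intro h; omega
      rw [hout, List.getD_eq_getElem vals 0 hlast, buildIdx_getD cs _ hlcs]
      rfl
    · -- two neighbouring candidates vals[r-1] < x ≤ vals[r]
      rw [if_neg hr0, if_neg hrlen]
      have hrlt : r < vals.length := by omega
      have hrm1 : r - 1 < vals.length := by omega
      have hLcs : vals[r - 1] ∈ cs := (hmemv _).mp (List.getElem_mem hrm1)
      have hRcs : vals[r] ∈ cs := (hmemv _).mp (List.getElem_mem hrlt)
      have hLlt : vals[r - 1] < x := hr2 (r - 1) hrm1 (by omega)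
      have hxR : x ≤ vals[r] := hr3 r hrlt (by omega)
      have hsplit : ∀ c ∈ cs,
          (c ≤ vals[r - 1] ∧ pdist x c = x - c) ∨ (vals[r] ≤ c ∧ pdist x c = c - x) := by
        intro c hc
        obtain ⟨i, hi, hic⟩ := hrep c hc
        rcases Nat.lt_or_ge i r with h | h
        · left
          have h1 : vals[i] ≤ vals[r - 1] := hmono i (r - 1) hi hrm1 (by omega)
          have h2 : vals[i] < x := hr2 i hi h
          rw [← hic]
          refine ⟨h1, ?_⟩
          simp only [pdist, abs_val]; split <;> omega
        · right
          have h1 : vals[r] ≤ vals[i] := hmono r i hrlt hi h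
          have h2 : x ≤ vals[i] := hr3 i hi h
          rw [← hic]
          refine ⟨h1, ?_⟩
          simp only [pdist, abs_val]; split <;> omega
      have hpdL : pdist x vals[r - 1] = x - vals[r - 1] := by
        simp only [pdist, abs_val]; split <;> omega
      have hpdR : pdist x vals[r] = vals[r] - x := by
        simp only [pdist, abs_val]; split <;> omega
      rw [List.getD_eq_getElem vals 0 hrm1, List.getD_eq_getElem vals 0 hrlt]
      by_cases hdl : x - vals[r - 1] < vals[r] - x
      · -- the left neighbour is strictly nearer
        rw [if_pos hdl]
        have hMv : M = x - vals[r - 1] := by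
          rw [hM]
          refine foldMin_eq_of x c0 rest _ ?_ ⟨vals[r - 1], hLcs, hpdL⟩
          intro c hc
          rcases hsplit c hc with ⟨h1, h2⟩ | ⟨h1, h2⟩ <;> omega
        have hout : nearest x c0 rest = Int.ofNat (cs.findIdx (· == vals[r - 1])) := by
          refine finish _ ?_
          intro c hc
          rw [Bool.eq_iff_iff]
          simp only [decide_eq_true_eq, beq_iff_eq]
          rw [hMv]
          constructor
          · intro h
            rcases hsplit c hc with ⟨h1, h2⟩ | ⟨h1, h2⟩ <;> omega
          · intro h; subst h; exact hpdL
        rw [hout, buildIdx_getD cs _ hLcs]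
        rfl
      · rw [if_neg hdl]
        by_cases hdh : vals[r] - x < x - vals[r - 1]
        · -- the right neighbour is strictly nearer
          rw [if_pos hdh]
          have hMv : M = vals[r] - x := by
            rw [hM]
            refine foldMin_eq_of x c0 rest _ ?_ ⟨vals[r], hRcs, hpdR⟩
            intro c hc
            rcases hsplit c hc with ⟨h1, h2⟩ | ⟨h1, h2⟩ <;> omega
          have hout : nearest x c0 rest = Int.ofNat (cs.findIdx (· == vals[r])) := by
            refine finish _ ?_
            intro c hc
            rw [Bool.eq_iff_iff]
            simp only [decide_eq_true_eq, beq_iff_eq]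
            rw [hMv]
            constructor
            · intro h
              rcases hsplit c hc with ⟨h1, h2⟩ | ⟨h1, h2⟩ <;> omega
            · intro h; subst h; exact hpdR
          rw [hout, buildIdx_getD cs _ hRcs]
          rfl
        · -- tie: both neighbours equidistant; the smaller original index wins
          rw [if_neg hdh]
          have htie : vals[r] - x = x - vals[r - 1] := by omega
          have hMv : M = x - vals[r - 1] := by
            rw [hM]
            refine foldMin_eq_of x c0 rest _ ?_ ⟨vals[r - 1], hLcs, hpdL⟩
            intro c hc
            rcases hsplit c hc with ⟨h1, h2⟩ | ⟨h1, h2⟩ <;> omega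
          have hout : nearest x c0 rest =
              Int.ofNat (cs.findIdx (fun c => (c == vals[r - 1]) || (c == vals[r]))) := by
            refine finish _ ?_
            intro c hc
            rw [Bool.eq_iff_iff]
            simp only [decide_eq_true_eq, Bool.or_eq_true, beq_iff_eq]
            rw [hMv]
            constructor
            · intro h
              rcases hsplit c hc with ⟨h1, h2⟩ | ⟨h1, h2⟩
              · left; omega
              · right; omega
            · intro h
              rcases h with h | h
              · subst h; exact hpdL
              · subst h; rw [hpdR]; omega
          have hmin := findIdx_or_min cs (fun c => c == vals[r - 1]) (fun c => c == vals[r])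
          rw [hout, hmin, buildIdx_getD cs _ hLcs, buildIdx_getD cs _ hRcs]
          simp only [Int.ofNat_eq_natCast, Nat.cast_min]

-- the two outer loops agree pointwise
theorem outer_eq (c0 : Int) (rest : List Int) (xs : List Int) :
    pvOuterA (c0 :: rest) xs =
      pvOuterB (pvBuildIdx (c0 :: rest))
        (PySem.List.sorted (pvBuildIdx (c0 :: rest)).keys (fun v => v) false) xs := by
  induction xs with
  | nil => rfl
  | cons x t ih =>
    show (pvInnerA x (c0 :: rest) (c0 :: rest).length 1 0
        (abs_val (x - (c0 :: rest).headD 0))).1 :: _ = _ :: _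
    rw [List.headD_cons, pointA_eq_nearest, ← pickB_eq_nearest, ih]

-- ===== VERDICT (by name: the statement is the Claim_ definition above) =====
theorem assign_clusters_spec : Claim_equal_assign_clusters := by
  intro data centroids _ hpre
  unfold Spec_assign_clusters
  cases centroids with
  | nil =>
    rcases hpre with h | h
    · exact absurd rfl h
    · subst h; rfl
  | cons c0 rest =>
    exact outer_eq c0 rest data
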